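-- pv_equiv track=rewrite | github.com/Platinum3nx/argus-demo-finance | auditLogger.py | validateEventSequence
-- ===== SOURCE A (Python) =====
-- from typing import List
--
-- def validateEventSequence(eventCodes: List[int]) -> int:
--     """
--     Validate a sequence of event codes.
--
--     @requires: True
--     @ensures: result >= 0
--
--     Returns 1 if sequence is valid, 0 otherwise.
--     Rule: Event 5 (Error) must be followed by Event 9 (Resolution).
--     """
--     pendingError = 0
--
--     for code in eventCodes:
--         if code == 5:
--             if pendingError == 1:
--                 return 0 # Error followed by error without resolution
--             pendingError = 1
--         elif code == 9:
--             if pendingError == 0: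
--                 return 0 # Resolution without error
--             pendingError = 0
--
--     # unmatched error at end
--     if pendingError == 1:
--         return 0
--
--     return 1
-- ===== SOURCE B (Python) =====
-- def validateEventSequence(eventCodes):
--     relevant = [c for c in eventCodes if c == 5 or c == 9]
--     return 1 if relevant == [5, 9] * (len(relevant) // 2) else 0
-- ===== Notes on version B (the rewrite author's own statement) =====
-- stated objective: alternative
-- what changed: Replaces A's streaming pending-error state machine with a materialize-then-pattern-match check: filter out the error/resolution codes and compare the filtered list to the alternating error-resolution pattern repeated half its length.
import Mathlib
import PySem

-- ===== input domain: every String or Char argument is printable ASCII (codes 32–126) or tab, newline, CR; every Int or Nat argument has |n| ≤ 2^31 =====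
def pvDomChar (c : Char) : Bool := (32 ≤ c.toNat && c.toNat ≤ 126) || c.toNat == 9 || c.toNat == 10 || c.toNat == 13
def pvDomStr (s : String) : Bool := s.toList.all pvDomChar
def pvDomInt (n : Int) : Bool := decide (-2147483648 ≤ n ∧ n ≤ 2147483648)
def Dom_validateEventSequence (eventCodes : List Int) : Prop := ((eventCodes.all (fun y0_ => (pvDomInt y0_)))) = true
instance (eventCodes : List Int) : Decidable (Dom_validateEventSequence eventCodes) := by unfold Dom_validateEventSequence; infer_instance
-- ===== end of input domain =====

-- B replaces A's streaming pending-error state machine with a filter-then-pattern-match check (alternative decomposition, same cost).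


-- ===== PORT A =====
-- the for-loop with early returns, as structural recursion over the list carrying pendingError
def pvALoop : List Int → Int → Int
  | [], pendingError => if pendingError = 1 then 0 else 1
  | code :: rest, pendingError =>
      if code = 5 then
        if pendingError = 1 then 0 else pvALoop rest 1
      else if code = 9 then
        if pendingError = 0 then 0 else pvALoop rest 0
      else pvALoop rest pendingError

def validateEventSequence (eventCodes : List Int) : Int := pvALoop eventCodes 0

-- ===== PORT B =====
-- Source B's `c == 5 or c == 9` filter predicate
def pvRel (c : Int) : Bool := c == 5 || c == 9

def validateEventSequence_alt (eventCodes : List Int) : Int :=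
  let relevant := eventCodes.filter pvRel
  if relevant = (List.replicate (relevant.length / 2) ([5, 9] : List Int)).flatten then 1 else 0

-- ===== PRECONDITION & SPEC =====
def Spec_validateEventSequence (eventCodes : List Int) (out : Int) : Prop := out = validateEventSequence_alt eventCodes
instance (eventCodes : List Int) (out : Int) : Decidable (Spec_validateEventSequence eventCodes out) := by unfold Spec_validateEventSequence; infer_instance

-- ===== CLAIM (what is proved, stated in full; the proofs are below) =====
def Claim_equal_validateEventSequence : Prop := ∀ (eventCodes : List Int), Dom_validateEventSequence eventCodes → Spec_validateEventSequence eventCodes (validateEventSequence eventCodes)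

-- ===== LEMMAS AND PROOFS =====

-- "pvGood l": l is a (possibly empty) concatenation of [5,9] blocks; "pvGood1 l": l is 9 followed by such
def pvGood : List Int → Bool
  | [] => true
  | [_] => false
  | a :: b :: r => a == 5 && b == 9 && pvGood r

def pvGood1 : List Int → Bool
  | [] => false
  | a :: r => a == 9 && pvGood r

theorem pvGood_cons5 (l : List Int) : pvGood ((5 : Int) :: l) = pvGood1 l := by
  cases l <;> simp [pvGood, pvGood1]

theorem pvGood_cons9 (l : List Int) : pvGood ((9 : Int) :: l) = false := by
  cases l <;> simp [pvGood]

theorem pvALoop_char : ∀ (xs : List Int),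
    pvALoop xs 0 = (if pvGood (xs.filter pvRel) then 1 else 0) ∧
    pvALoop xs 1 = (if pvGood1 (xs.filter pvRel) then 1 else 0) := by
  intro xs
  induction xs with
  | nil => simp [pvALoop, pvGood, pvGood1]
  | cons c rest ih =>
    obtain ⟨ih0, ih1⟩ := ih
    by_cases h5 : c = 5
    · subst h5
      refine ⟨?_, ?_⟩
      · simpa [pvALoop, List.filter_cons, pvRel, pvGood_cons5] using ih1
      · simp [pvALoop, pvRel, pvGood1]
    · by_cases h9 : c = 9
      · subst h9
        refine ⟨?_, ?_⟩
        · simp [pvALoop, pvRel, pvGood_cons9]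
        · simpa [pvALoop, List.filter_cons, pvRel, pvGood1] using ih0
      · exact ⟨by simpa [pvALoop, List.filter_cons, pvRel, h5, h9] using ih0,
               by simpa [pvALoop, List.filter_cons, pvRel, h5, h9] using ih1⟩

theorem pvGood_iff_pattern : ∀ (l : List Int),
    pvGood l = true ↔ l = (List.replicate (l.length / 2) ([5, 9] : List Int)).flatten := by
  intro l
  induction l using pvGood.induct with
  | case1 => simp [pvGood]
  | case2 a => simp [pvGood]
  | case3 a b r ih =>
      have hlen : ((a :: b :: r).length) / 2 = r.length / 2 + 1 := by simp; omega
      rw [hlen, List.replicate_succ, List.flatten_cons]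
      simp [pvGood, ih]
      tauto

-- ===== VERDICT (by name: the statement is the Claim_ definition above) =====
theorem validateEventSequence_spec : Claim_equal_validateEventSequence := by
  intro xs _
  show validateEventSequence xs = validateEventSequence_alt xs
  unfold validateEventSequence validateEventSequence_alt
  rw [(pvALoop_char xs).1]
  by_cases h : pvGood (xs.filter pvRel) = true
  · rw [if_pos h, if_pos ((pvGood_iff_pattern _).mp h)]
  · rw [if_neg h, if_neg (fun hp => h ((pvGood_iff_pattern _).mpr hp))]
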